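-- pv_equiv track=rewrite | github.com/Enorma/ALGO2020 | precedence_FINAL.py | findNonDeterminism
-- ===== SOURCE A (Python) =====
-- def findNonDeterminism(A):
--
--     nds    = None
--     chosen = None
--
--     #buscar los nodeterminismos salientes de cada estado
--     for i in A.keys():
--
--         nds = {}
--
--         for j in A[i].keys():
--
--             if len(A[i][j])>0:
--
--                 for letter in A[i][j]:
--
--                     if letter not in nds.keys():
--                         nds[letter] = set([j])
--                     else:
--                         nds[letter].add(j)
--                     #if-else
--                 #for
--             #if
--         #for
--
--         #si alguna letra lleva a más de un estado, es un nodeterminismo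
--         for letter in nds.keys():
--             if len(nds[letter])>1:
--                 chosen = (i, letter)
--                 break
--             #if
--         #for
--
--         if chosen is not None:
--             break
--         #if
--     #for
--
--     if chosen is None:
--         return []
--     #if
--
--     mergeables = []
--
--     #encontrar los estados a los que llegamos con el nodeterminismo
--     for j in A[chosen[0]].keys():
--         if chosen[1] in A[chosen[0]][j]:
--             mergeables.append(j)
--         #if
--     #for
--
--     return mergeables
-- ===== SOURCE B (Python) =====
-- def findNonDeterminism(A):
--
--     #dict-free approach: per state, list the distinct letters in first-occurrence
--     #order, then for each such letter rebuild its ordered destination list by a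
--     #direct scan of the adjacency; return the first list longer than one state
--     for inner in A.values():
--
--         seen = []
--         for cell in inner.values():
--             for letter in cell:
--                 if letter not in seen:
--                     seen.append(letter)
--
--         for letter in seen:
--             dests = [j for j, cell in inner.items() if letter in cell]
--             if len(dests) > 1:
--                 return dests
--
--     return []
-- ===== Notes on version B (the rewrite author's own statement) =====
-- stated objective: alternative
-- what changed: B drops A's letter-to-destination-set dictionary entirely: it collects the distinct letters of a state in first-occurrence order into a plain list, then for each letter rebuilds its ordered destination list by a direct rescan of the adjacency and returns the first list with more than one state; it trades A's single-pass grouping dict for letter-wise rescans. Pre_ only excludes association lists with duplicate (outer or inner) keys, which cannot arise from a Python dict.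
import Mathlib
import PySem

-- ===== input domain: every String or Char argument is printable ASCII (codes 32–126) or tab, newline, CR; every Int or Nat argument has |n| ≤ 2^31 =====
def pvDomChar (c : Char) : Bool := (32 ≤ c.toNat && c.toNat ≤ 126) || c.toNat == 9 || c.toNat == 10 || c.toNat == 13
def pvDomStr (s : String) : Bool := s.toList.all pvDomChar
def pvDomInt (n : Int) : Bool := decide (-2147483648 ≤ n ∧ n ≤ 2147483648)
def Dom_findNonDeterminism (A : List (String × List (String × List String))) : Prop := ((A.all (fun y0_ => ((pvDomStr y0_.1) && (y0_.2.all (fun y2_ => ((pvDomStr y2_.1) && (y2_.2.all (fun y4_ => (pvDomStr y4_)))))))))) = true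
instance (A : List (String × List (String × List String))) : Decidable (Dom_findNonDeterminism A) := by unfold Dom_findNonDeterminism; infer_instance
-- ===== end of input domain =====

-- B drops A's letter->destination-set dictionary: it lists the distinct letters in
-- first-occurrence order and rescans the adjacency per letter (alternative decomposition).


-- ===== PORT A =====
def pvA_addCell (nds : PySem.Dict String (PySem.Set String)) (j : String) (cell : List String) :
    PySem.Dict String (PySem.Set String) :=
  cell.foldl (fun nds letter =>
    if nds.contains letter = false then nds.insert letter (PySem.Set.ofList [j])
    else nds.modify letter PySem.Set.empty (fun s => PySem.Set.add s j)) nds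

def pvA_buildNds (row : PySem.Dict String (List String)) : PySem.Dict String (PySem.Set String) :=
  row.keys.foldl (fun nds j =>
    let cell := row.getD j []
    if cell.length > 0 then pvA_addCell nds j cell else nds) PySem.Dict.empty

def pvA_firstLetter (nds : PySem.Dict String (PySem.Set String)) : List String → Option String
  | [] => none
  | l :: rest =>
    if PySem.Set.len (nds.getD l PySem.Set.empty) > 1 then some l
    else pvA_firstLetter nds rest

def pvA_findChosen (dA : PySem.Dict String (List (String × List String))) :
    List String → Option (String × String)
  | [] => none
  | i :: rest =>
    let nds := pvA_buildNds (PySem.Dict.mk (dA.getD i []))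
    match pvA_firstLetter nds nds.keys with
    | some l => some (i, l)
    | none => pvA_findChosen dA rest

def findNonDeterminism (A : List (String × List (String × List String))) : List String :=
  let dA := PySem.Dict.mk A
  match pvA_findChosen dA dA.keys with
  | none => []
  | some (i, letter) =>
    let row := PySem.Dict.mk (dA.getD i [])
    row.keys.foldl (fun m j => if letter ∈ row.getD j [] then m ++ [j] else m) []

-- ===== PORT B =====
def pvB_seen1 (seen : List String) (cell : List String) : List String :=
  cell.foldl (fun s letter => if letter ∈ s then s else s ++ [letter]) seen

def pvB_seen (inner : List (String × List String)) : List String :=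
  inner.foldl (fun s p => pvB_seen1 s p.2) []

def pvB_dests (inner : List (String × List String)) (letter : String) : List String :=
  (inner.filter (fun p => decide (letter ∈ p.2))).map Prod.fst

def pvB_scan (inner : List (String × List String)) : List String → Option (List String)
  | [] => none
  | letter :: rest =>
    let dests := pvB_dests inner letter
    if dests.length > 1 then some dests else pvB_scan inner rest

def pvB_loop : List (List (String × List String)) → List String
  | [] => []
  | inner :: rest =>
    match pvB_scan inner (pvB_seen inner) with
    | some dests => dests
    | none => pvB_loop rest

def findNonDeterminism_alt (A : List (String × List (String × List String))) : List String :=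
  pvB_loop (A.map Prod.snd)

-- ===== PRECONDITION & SPEC =====
-- Pre_ excludes association lists with duplicate outer or inner keys: such lists cannot arise
-- from a Python dict, and A's first-match lookup behaviour on them is an artefact of the encoding.
def Pre_findNonDeterminism (A : List (String × List (String × List String))) : Prop :=
  (A.map Prod.fst).Nodup ∧ ∀ p ∈ A, (p.2.map Prod.fst).Nodup

instance (A : List (String × List (String × List String))) : Decidable (Pre_findNonDeterminism A) := by
  unfold Pre_findNonDeterminism; infer_instance

def pvWitness_findNonDeterminism : (List (String × List (String × List String))) :=
  [("q0", [("a", ["x", "y"]), ("b", ["x"])])]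

def Spec_findNonDeterminism (A : List (String × List (String × List String))) (out : List String) : Prop := out = findNonDeterminism_alt A
instance (A : List (String × List (String × List String))) (out : List String) : Decidable (Spec_findNonDeterminism A out) := by unfold Spec_findNonDeterminism; infer_instance

-- ===== CLAIM (what is proved, stated in full; the proofs are below) =====
def Claim_equal_findNonDeterminism : Prop := ∀ (A : List (String × List (String × List String))), Dom_findNonDeterminism A → Pre_findNonDeterminism A → Spec_findNonDeterminism A (findNonDeterminism A)

-- ===== LEMMAS AND PROOFS =====

-- proof-only helper: a list-valued mirror of A's per-cell dict update
def pvH_cell (j : String) (nds : PySem.Dict String (List String)) (cell : List String) :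
    PySem.Dict String (List String) :=
  cell.foldl (fun nds letter =>
    if nds.contains letter = false then nds.insert letter [j]
    else if PySem.List.pyGet? (nds.getD letter []) (-1) ≠ some j then
      nds.modify letter [] (fun v => v ++ [j])
    else nds) nds

def pvH_build (inner : List (String × List String)) : PySem.Dict String (List String) :=
  inner.foldl (fun nds p => pvH_cell p.1 nds p.2) PySem.Dict.empty

theorem pv_find_replace {v : Type} : ∀ (items : List (String × v)) (k : String) (w : v),
    (items.map Prod.fst).Nodup → items.find? (fun p => p.1 == k) = some (k, w) →
    items.map (fun p => if (p.1 == k) = true then (k, w) else p) = items := by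
  intro items
  induction items with
  | nil => intro k w _ h; simp [List.find?] at h
  | cons q rest ih =>
    intro k w hnd hf
    rw [List.find?_cons] at hf
    simp only [List.map_cons, List.nodup_cons] at hnd
    by_cases hq : (q.1 == k) = true
    · simp only [hq] at hf ⊢
      have hqe : q = (k, w) := by injection hf
      subst hqe
      simp only [List.map_cons]
      congr 1
      · simp
      · rw [List.map_congr_left (g := id) ?_, List.map_id]
        intro p hp
        have hk : p.1 ≠ k := fun h => hnd.1 (h ▸ (List.mem_map_of_mem hp : p.1 ∈ _))
        simp [hk]
    · simp only [hq] at hf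
      simp only [List.map_cons, if_neg hq]
      rw [ih k w hnd.2 hf]

theorem pv_insert_getD_self {v : Type} (d : PySem.Dict String v) (k : String) (d0 : v)
    (hc : d.contains k = true) (hnd : d.keys.Nodup) : d.insert k (d.getD k d0) = d := by
  have hfind : ∃ p, d.items.find? (fun p => p.1 == k) = some p := by
    have : (d.items.find? (fun p => p.1 == k)).isSome := by
      rw [List.find?_isSome]
      simpa [PySem.Dict.contains, List.any_eq_true] using hc
    exact Option.isSome_iff_exists.mp this
  obtain ⟨p, hp⟩ := hfind
  have hk : p.1 = k := by
    have := List.find?_some hp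
    simpa using this
  have hg : d.getD k d0 = p.2 := by
    simp [PySem.Dict.getD, PySem.Dict.get?, hp]
  have hp' : d.items.find? (fun p => p.1 == k) = some (k, p.2) := by
    rw [hp]; congr 1; exact Prod.ext hk rfl
  show d.insert k (d.getD k d0) = d
  rw [PySem.Dict.insert, if_pos hc, hg]
  have := pv_find_replace d.items k p.2 hnd hp'
  exact PySem.Dict.ext (by simpa using this)

theorem pv_cell_getD : ∀ (cell : List String) (nds : PySem.Dict String (List String)) (j : String)
    (base : String → List String) (got : String → Bool),
    (∀ l, nds.getD l [] = base l ++ (if got l then [j] else [])) →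
    (∀ l, j ∉ base l) →
    (∀ l, nds.contains l = true → nds.getD l [] ≠ []) →
    (∀ l, (pvH_cell j nds cell).getD l [] =
        base l ++ (if (got l || decide (l ∈ cell)) then [j] else [])) ∧
    (∀ l, (pvH_cell j nds cell).contains l = true → (pvH_cell j nds cell).getD l [] ≠ []) := by
  intro cell
  induction cell with
  | nil =>
    intro nds j base got H Hj Hne
    constructor
    · intro l; simpa using H l
    · intro l hc; exact Hne l hc
  | cons x rest ih =>
    intro nds j base got H Hj Hne
    have step : pvH_cell j nds (x :: rest) = pvH_cell j (
        if nds.contains x = false then nds.insert x [j]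
        else if PySem.List.pyGet? (nds.getD x []) (-1) ≠ some j then
          nds.modify x [] (fun v => v ++ [j])
        else nds) rest := by
      simp only [pvH_cell, List.foldl_cons]
    rw [step]
    by_cases hc : nds.contains x = false
    · -- fresh letter: insert [j]
      rw [if_pos hc]
      have hx0 : nds.getD x [] = [] := PySem.Dict.getD_of_not_contains nds [] hc
      have hbx : base x = [] ∧ got x = false := by
        have := (H x).symm.trans hx0
        rcases List.append_eq_nil_iff.mp this with ⟨h1, h2⟩
        refine ⟨h1, ?_⟩
        by_cases hg : got x = true
        · rw [if_pos hg] at h2; simp at h2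
        · simpa using hg
      have Hres := ih (nds.insert x [j]) j base (fun l => got l || (l == x)) ?_ Hj ?_
      · constructor
        · intro l
          rw [(Hres.1 l)]
          congr 2
          by_cases hlx : l = x <;> by_cases hgl : got l = true <;>
            simp [hlx, hgl, List.mem_cons]
        · exact Hres.2
      · intro l
        rw [PySem.Dict.getD_insert]
        by_cases hlx : l = x
        · subst hlx; simp [hbx.1, hbx.2]
        · simp only [if_neg hlx, H l]
          congr 2
          simp [beq_iff_eq, hlx]
      · intro l hcl
        rw [PySem.Dict.contains_insert] at hcl
        rw [PySem.Dict.getD_insert]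
        by_cases hlx : l = x
        · simp [hlx]
        · simp only [if_neg hlx]
          exact Hne l (by simpa [beq_iff_eq, hlx] using hcl)
    · -- letter present
      rw [if_neg hc]
      have hc' : nds.contains x = true := by simpa using hc
      by_cases hlast : PySem.List.pyGet? (nds.getD x []) (-1) = some j
      · -- already ends with j: no-op; got x must be true
        rw [if_neg (by simpa using hlast)]
        have hgx : got x = true := by
          by_contra hg
          have hgf : got x = false := by simpa using hg
          have hge : nds.getD x [] = base x := by simp [H x, hgf]
          have : j ∈ base x := by
            have := PySem.List.mem_of_pyGet?_eq_some _ hlast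
            rwa [hge] at this
          exact Hj x this
        have Hres := ih nds j base (fun l => got l || (l == x)) ?_ Hj Hne
        · constructor
          · intro l
            rw [Hres.1 l]
            congr 2
            by_cases hlx : l = x <;> by_cases hgl : got l = true <;>
              simp [hlx, hgl, List.mem_cons, hgx]
          · exact Hres.2
        · intro l
          rw [H l]
          congr 2
          by_cases hlx : l = x
          · subst hlx; simp [hgx]
          · simp [beq_iff_eq, hlx]
      · -- append j; got x must be false
        rw [if_pos (by simpa using hlast)]
        have hgx : got x = false := by
          by_contra hg
          have hgt : got x = true := by simpa using hg
          have : nds.getD x [] = base x ++ [j] := by simp [H x, hgt]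
          exact hlast (this ▸ PySem.List.pyGet?_neg_one_append_singleton _ _)
        have hbne : base x ≠ [] := by
          intro h0
          have : nds.getD x [] = [] := by simp [H x, hgx, h0]
          exact Hne x hc' this
        have Hres := ih (nds.modify x [] (fun v => v ++ [j])) j base
            (fun l => got l || (l == x)) ?_ Hj ?_
        · constructor
          · intro l
            rw [Hres.1 l]
            congr 2
            by_cases hlx : l = x <;> by_cases hgl : got l = true <;>
              simp [hlx, hgl, List.mem_cons]
          · exact Hres.2
        · intro l
          rw [PySem.Dict.getD_modify]
          by_cases hlx : l = x
          · subst hlx; simp [H l, hgx]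
          · simp only [if_neg hlx, H l]
            congr 2
            simp [beq_iff_eq, hlx]
        · intro l hcl
          rw [PySem.Dict.contains_modify] at hcl
          rw [PySem.Dict.getD_modify]
          by_cases hlx : l = x
          · subst hlx; simp
          · simp only [if_neg hlx]
            exact Hne l (by simpa [beq_iff_eq, hlx] using hcl)

theorem pv_cell_nodup : ∀ (cell : List String) (nds : PySem.Dict String (List String)) (j : String),
    nds.keys.Nodup → (pvH_cell j nds cell).keys.Nodup := by
  intro cell
  induction cell with
  | nil => intro nds j h; exact h
  | cons x rest ih =>
    intro nds j h
    simp only [pvH_cell, List.foldl_cons] at *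
    apply ih
    split
    · exact PySem.Dict.nodup_keys_insert _ _ _ h
    · split
      · exact PySem.Dict.nodup_keys_insert _ _ _ h
      · exact h

theorem pv_cell_eq : ∀ (cell : List String) (nds : PySem.Dict String (List String)) (j : String),
    nds.keys.Nodup →
    (∀ l, j ∈ nds.getD l [] ↔ PySem.List.pyGet? (nds.getD l []) (-1) = some j) →
    (∀ l, nds.contains l = true → nds.getD l [] ≠ []) →
    pvA_addCell nds j cell = pvH_cell j nds cell := by
  intro cell
  induction cell with
  | nil => intro nds j _ _ _; rfl
  | cons x rest ih =>
    intro nds j hnd Hmem Hne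
    simp only [pvA_addCell, pvH_cell, List.foldl_cons]
    by_cases hc : nds.contains x = false
    · rw [if_pos hc, if_pos hc]
      have hofl : PySem.Set.ofList [j] = [j] := rfl
      rw [hofl]
      refine ih (nds.insert x [j]) j (PySem.Dict.nodup_keys_insert _ _ _ hnd) ?_ ?_
      · intro l
        rw [PySem.Dict.getD_insert]
        by_cases hlx : l = x
        · subst hlx
          have h1 := PySem.List.pyGet?_neg_one_append_singleton ([] : List String) j
          simp only [List.nil_append] at h1
          simp [h1]
        · simp only [if_neg hlx]; exact Hmem l
      · intro l hcl
        rw [PySem.Dict.contains_insert] at hcl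
        rw [PySem.Dict.getD_insert]
        by_cases hlx : l = x
        · simp [hlx]
        · simp only [if_neg hlx]
          exact Hne l (by simpa [beq_iff_eq, hlx] using hcl)
    · rw [if_neg hc, if_neg hc]
      have hc' : nds.contains x = true := by simpa using hc
      by_cases hlast : PySem.List.pyGet? (nds.getD x []) (-1) = some j
      · rw [if_neg (by simpa using hlast)]
        have hjmem : j ∈ nds.getD x [] := (Hmem x).mpr hlast
        have hmod : nds.modify x PySem.Set.empty (fun s => PySem.Set.add s j) = nds := by
          rw [PySem.Dict.modify]
          have hsetD : nds.getD x PySem.Set.empty = nds.getD x [] := rfl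
          rw [hsetD, PySem.Set.add_of_mem hjmem]
          exact pv_insert_getD_self nds x [] hc' hnd
        rw [hmod]
        exact ih nds j hnd Hmem Hne
      · rw [if_pos (by simpa using hlast)]
        have hjn : j ∉ nds.getD x [] := fun h => hlast ((Hmem x).mp h)
        have hmod : nds.modify x PySem.Set.empty (fun s => PySem.Set.add s j)
            = nds.modify x [] (fun v => v ++ [j]) := by
          rw [PySem.Dict.modify, PySem.Dict.modify]
          have hsetD : nds.getD x PySem.Set.empty = nds.getD x [] := rfl
          rw [hsetD, PySem.Set.add_of_not_mem hjn]
        rw [hmod]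
        refine ih _ j ?_ ?_ ?_
        · rw [PySem.Dict.modify]; exact PySem.Dict.nodup_keys_insert _ _ _ hnd
        · intro l
          rw [PySem.Dict.getD_modify]
          by_cases hlx : l = x
          · subst hlx
            rw [if_pos rfl]
            constructor
            · intro _; exact PySem.List.pyGet?_neg_one_append_singleton _ _
            · intro _; simp
          · simp only [if_neg hlx]; exact Hmem l
        · intro l hcl
          rw [PySem.Dict.contains_modify] at hcl
          rw [PySem.Dict.getD_modify]
          by_cases hlx : l = x
          · subst hlx; simp
          · simp only [if_neg hlx]
            exact Hne l (by simpa [beq_iff_eq, hlx] using hcl)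

theorem pv_build_getD : ∀ (row : List (String × List String)) (nds : PySem.Dict String (List String)),
    (row.map Prod.fst).Nodup →
    (∀ p ∈ row, ∀ l, p.1 ∉ nds.getD l []) →
    (∀ l, nds.contains l = true → nds.getD l [] ≠ []) →
    (∀ l, (row.foldl (fun nds p => pvH_cell p.1 nds p.2) nds).getD l []
        = nds.getD l [] ++ pvB_dests row l) ∧
    (∀ l, (row.foldl (fun nds p => pvH_cell p.1 nds p.2) nds).contains l = true →
        (row.foldl (fun nds p => pvH_cell p.1 nds p.2) nds).getD l [] ≠ []) := by
  intro row
  induction row with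
  | nil =>
    intro nds _ _ Hne
    exact ⟨fun l => by simp [pvB_dests], fun l h => Hne l h⟩
  | cons p rest ih =>
    intro nds hnd Hfresh Hne
    simp only [List.foldl_cons]
    have Hcell := pv_cell_getD p.2 nds p.1 (fun l => nds.getD l []) (fun _ => false)
      (by intro l; simp) (fun l => Hfresh p (by simp) l) Hne
    simp only [List.map_cons, List.nodup_cons] at hnd
    have Hres := ih (pvH_cell p.1 nds p.2) hnd.2 ?_ Hcell.2
    · constructor
      · intro l
        rw [Hres.1 l, Hcell.1 l]
        simp only [Bool.false_or]
        simp only [pvB_dests, List.filter_cons]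
        by_cases hm : l ∈ p.2 <;> simp [hm]
      · exact Hres.2
    · intro q hq l
      rw [Hcell.1 l]
      simp only [Bool.false_or, List.mem_append]
      rintro (h | h)
      · exact Hfresh q (by simp [hq]) l h
      · have : q.1 = p.1 := by
          rcases (by split at h <;> simp_all : q.1 = p.1 ∨ False) with h1 | h1
          · exact h1
          · exact absurd h1 not_false
        exact hnd.1 (this ▸ (List.mem_map_of_mem hq : q.1 ∈ _))

theorem pv_row_eq : ∀ (row : List (String × List String)) (nds : PySem.Dict String (List String)),
    nds.keys.Nodup →
    (row.map Prod.fst).Nodup →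
    (∀ p ∈ row, ∀ l, p.1 ∉ nds.getD l []) →
    (∀ l, nds.contains l = true → nds.getD l [] ≠ []) →
    row.foldl (fun nds p => if p.2.length > 0 then pvA_addCell nds p.1 p.2 else nds) nds
      = row.foldl (fun nds p => pvH_cell p.1 nds p.2) nds := by
  intro row
  induction row with
  | nil => intro nds _ _ _ _; rfl
  | cons p rest ih =>
    intro nds hndk hnd Hfresh Hne
    simp only [List.foldl_cons]
    have hstep : (if p.2.length > 0 then pvA_addCell nds p.1 p.2 else nds) = pvH_cell p.1 nds p.2 := by
      by_cases hl : p.2.length > 0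
      · rw [if_pos hl]
        refine pv_cell_eq p.2 nds p.1 hndk ?_ Hne
        intro l
        constructor
        · intro h; exact absurd h (Hfresh p (by simp) l)
        · intro h; exact absurd (PySem.List.mem_of_pyGet?_eq_some _ h) (Hfresh p (by simp) l)
      · rw [if_neg hl]
        have : p.2 = [] := by
          cases h2 : p.2 with
          | nil => rfl
          | cons a b => rw [h2] at hl; simp at hl
        rw [this]; rfl
    rw [hstep]
    simp only [List.map_cons, List.nodup_cons] at hnd
    have Hcell := pv_cell_getD p.2 nds p.1 (fun l => nds.getD l []) (fun _ => false)
      (by intro l; simp) (fun l => Hfresh p (by simp) l) Hne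
    refine ih (pvH_cell p.1 nds p.2) (pv_cell_nodup p.2 nds p.1 hndk) hnd.2 ?_ Hcell.2
    intro q hq l
    rw [Hcell.1 l]
    simp only [Bool.false_or, List.mem_append]
    rintro (h | h)
    · exact Hfresh q (by simp [hq]) l h
    · have : q.1 = p.1 := by
        rcases (by split at h <;> simp_all : q.1 = p.1 ∨ False) with h1 | h1
        · exact h1
        · exact absurd h1 not_false
      exact hnd.1 (this ▸ (List.mem_map_of_mem hq : q.1 ∈ _))

theorem pv_fold_keys_pairs {a b : Type} : ∀ (row : List (String × a)) (g : String → a)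
    (f : b → String → a → b) (init : b),
    (∀ p ∈ row, g p.1 = p.2) →
    (row.map Prod.fst).foldl (fun d k => f d k (g k)) init = row.foldl (fun d p => f d p.1 p.2) init := by
  intro row
  induction row with
  | nil => intro g f init _; rfl
  | cons p rest ih =>
    intro g f init h
    simp only [List.map_cons, List.foldl_cons, h p (by simp)]
    exact ih g f _ (fun q hq => h q (by simp [hq]))

theorem pv_filter_keys {a : Type} : ∀ (row : List (String × a)) (g : String → a) (q : a → Bool),
    (∀ p ∈ row, g p.1 = p.2) →
    (row.map Prod.fst).filter (fun k => q (g k)) = (row.filter (fun p => q p.2)).map Prod.fst := by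
  intro row
  induction row with
  | nil => intro g q _; rfl
  | cons p rest ih =>
    intro g q h
    simp only [List.map_cons, List.filter_cons, h p (by simp)]
    rw [ih g q (fun r hr => h r (by simp [hr]))]
    by_cases hq : q p.2 = true <;> simp [hq]

theorem pv_getD_mk {a : Type} : ∀ (row : List (String × a)) (p : String × a) (d0 : a),
    (row.map Prod.fst).Nodup → p ∈ row → (PySem.Dict.mk row).getD p.1 d0 = p.2 := by
  intro row p d0 hnd hp
  exact PySem.Dict.getD_of_mem_items (d := PySem.Dict.mk row) (by simpa using hp)
    (by simpa [PySem.Dict.keys] using hnd) d0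

-- keys of the per-cell update evolve exactly like B's seen list
theorem pv_cell_keys : ∀ (cell : List String) (nds : PySem.Dict String (List String)) (j : String),
    (pvH_cell j nds cell).keys = pvB_seen1 nds.keys cell := by
  intro cell
  induction cell with
  | nil => intro nds j; rfl
  | cons x rest ih =>
    intro nds j
    simp only [pvH_cell, pvB_seen1, List.foldl_cons]
    by_cases hc : nds.contains x = false
    · rw [if_pos hc]
      have hx : x ∉ nds.keys := by
        intro hm
        rw [(PySem.Dict.contains_iff_mem_keys nds x).mpr hm] at hc
        simp at hc
      rw [if_neg hx]
      have := ih (nds.insert x [j]) j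
      simp only [pvH_cell, pvB_seen1] at this
      rw [this, PySem.Dict.keys_insert_of_not_contains nds [j] hc]
    · rw [if_neg hc]
      have hc' : nds.contains x = true := by simpa using hc
      have hx : x ∈ nds.keys := (PySem.Dict.contains_iff_mem_keys nds x).mp hc'
      rw [if_pos hx]
      by_cases hlast : PySem.List.pyGet? (nds.getD x []) (-1) = some j
      · rw [if_neg (by simpa using hlast)]
        have := ih nds j
        simpa only [pvH_cell, pvB_seen1] using this
      · rw [if_pos (by simpa using hlast)]
        have := ih (nds.modify x [] (fun v => v ++ [j])) j
        simp only [pvH_cell, pvB_seen1] at this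
        rw [this, PySem.Dict.keys_modify, PySem.Dict.keys_insert_of_contains nds _ hc']

theorem pv_build_keys : ∀ (row : List (String × List String)) (nds : PySem.Dict String (List String)),
    (row.foldl (fun nds p => pvH_cell p.1 nds p.2) nds).keys
      = row.foldl (fun s p => pvB_seen1 s p.2) nds.keys := by
  intro row
  induction row with
  | nil => intro nds; rfl
  | cons p rest ih =>
    intro nds
    simp only [List.foldl_cons]
    rw [ih (pvH_cell p.1 nds p.2), pv_cell_keys]

theorem pv_rescan_eq (row : List (String × List String)) (l : String)
    (hnd : (row.map Prod.fst).Nodup) :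
    (PySem.Dict.mk row).keys.foldl
        (fun m j => if l ∈ (PySem.Dict.mk row).getD j [] then m ++ [j] else m) []
      = pvB_dests row l := by
  rw [PySem.Dict.keys_mk]
  have h1 := PySem.List.foldl_append_if (fun j => decide (l ∈ (PySem.Dict.mk row).getD j []))
    (fun j => j) (row.map Prod.fst) []
  simp only [decide_eq_true_eq] at h1
  rw [h1]
  simp only [List.nil_append, List.map_id']
  have h2 := pv_filter_keys row (fun k => (PySem.Dict.mk row).getD k []) (fun c => decide (l ∈ c))
    (fun p hp => pv_getD_mk row p [] hnd hp)
  rw [h2]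
  rfl

theorem pv_buildA_eq (row : List (String × List String)) (hnd : (row.map Prod.fst).Nodup) :
    pvA_buildNds (PySem.Dict.mk row) = pvH_build row := by
  have h1 : pvA_buildNds (PySem.Dict.mk row)
      = (row.map Prod.fst).foldl (fun nds j =>
          if ((PySem.Dict.mk row).getD j []).length > 0 then
            pvA_addCell nds j ((PySem.Dict.mk row).getD j []) else nds) PySem.Dict.empty := by
    simp [pvA_buildNds, PySem.Dict.keys_mk]
  rw [h1, pv_fold_keys_pairs row (fun k => (PySem.Dict.mk row).getD k [])
    (fun d k c => if c.length > 0 then pvA_addCell d k c else d) PySem.Dict.empty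
    (fun p hp => pv_getD_mk row p [] hnd hp)]
  exact pv_row_eq row PySem.Dict.empty (by simp [PySem.Dict.keys_empty]) hnd
    (by intro p hp l; simp [PySem.Dict.getD_empty])
    (by intro l h; simp [PySem.Dict.contains_empty] at h)

theorem pv_scan_eq : ∀ (ks : List String) (nds : PySem.Dict String (List String))
    (inner : List (String × List String)),
    (∀ l, nds.getD l [] = pvB_dests inner l) →
    pvB_scan inner ks = Option.map (fun l => nds.getD l []) (pvA_firstLetter nds ks) := by
  intro ks nds inner hg
  induction ks with
  | nil => rfl
  | cons l rest ih =>
    simp only [pvB_scan, pvA_firstLetter]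
    have hlen : PySem.Set.len (nds.getD l PySem.Set.empty) > 1 ↔ (pvB_dests inner l).length > 1 := by
      have h0 : nds.getD l PySem.Set.empty = pvB_dests inner l := hg l
      simp only [PySem.Set.len, h0]
      exact_mod_cast Iff.rfl
    by_cases h : (pvB_dests inner l).length > 1
    · rw [if_pos h, if_pos (hlen.mpr h)]
      simp [hg l]
    · rw [if_neg h, if_neg (fun hc => h (hlen.mp hc))]
      exact ih

theorem pv_outer : ∀ (pairs : List (String × List (String × List String)))
    (dA : PySem.Dict String (List (String × List String))),
    (∀ p ∈ pairs, dA.getD p.1 [] = p.2) →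
    (∀ p ∈ pairs, (p.2.map Prod.fst).Nodup) →
    (match pvA_findChosen dA (pairs.map Prod.fst) with
     | none => []
     | some (i, letter) =>
        (PySem.Dict.mk (dA.getD i [])).keys.foldl
          (fun m j => if letter ∈ (PySem.Dict.mk (dA.getD i [])).getD j [] then m ++ [j] else m) [])
      = pvB_loop (pairs.map Prod.snd) := by
  intro pairs
  induction pairs with
  | nil => intro dA _ _; rfl
  | cons p rest ih =>
    intro dA Hlook Hinner
    have hrow : dA.getD p.1 [] = p.2 := Hlook p (by simp)
    have hndrow : (p.2.map Prod.fst).Nodup := Hinner p (by simp)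
    have hbuild : pvA_buildNds (PySem.Dict.mk (dA.getD p.1 [])) = pvH_build p.2 := by
      rw [hrow]; exact pv_buildA_eq p.2 hndrow
    have hb := pv_build_getD p.2 PySem.Dict.empty hndrow
      (by intro q hq l; simp [PySem.Dict.getD_empty])
      (by intro l h; simp [PySem.Dict.contains_empty] at h)
    have hgetD : ∀ l, (pvH_build p.2).getD l [] = pvB_dests p.2 l := by
      intro l
      have := hb.1 l
      simpa [pvH_build, PySem.Dict.getD_empty] using this
    have hkeys : (pvH_build p.2).keys = pvB_seen p.2 := by
      have := pv_build_keys p.2 PySem.Dict.empty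
      simpa [pvH_build, pvB_seen, PySem.Dict.keys_empty] using this
    have hscan := pv_scan_eq (pvH_build p.2).keys (pvH_build p.2) p.2 hgetD
    simp only [List.map_cons, pvA_findChosen, pvB_loop, hbuild]
    cases hfl : pvA_firstLetter (pvH_build p.2) (pvH_build p.2).keys with
    | none =>
      have hsc : pvB_scan p.2 (pvB_seen p.2) = none := by
        rw [← hkeys, hscan, hfl]; rfl
      rw [hsc]
      exact ih dA (fun q hq => Hlook q (by simp [hq])) (fun q hq => Hinner q (by simp [hq]))
    | some l =>
      have hsc : pvB_scan p.2 (pvB_seen p.2) = some ((pvH_build p.2).getD l []) := by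
        rw [← hkeys, hscan, hfl]; rfl
      rw [hsc]
      simp only
      rw [hrow, pv_rescan_eq p.2 l hndrow, hgetD l]

-- ===== VERDICT (by name: the statement is the Claim_ definition above) =====
theorem findNonDeterminism_spec : Claim_equal_findNonDeterminism := by
  unfold Claim_equal_findNonDeterminism
  intro A _ hpre
  show findNonDeterminism A = findNonDeterminism_alt A
  unfold findNonDeterminism findNonDeterminism_alt
  show (match pvA_findChosen (PySem.Dict.mk A) (PySem.Dict.mk A).keys with
       | none => []
       | some (i, letter) =>
         (PySem.Dict.mk ((PySem.Dict.mk A).getD i [])).keys.foldl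
           (fun m j => if letter ∈ (PySem.Dict.mk ((PySem.Dict.mk A).getD i [])).getD j [] then m ++ [j] else m) [])
     = pvB_loop (A.map Prod.snd)
  rw [PySem.Dict.keys_mk]
  exact pv_outer A (PySem.Dict.mk A) (fun p hp => pv_getD_mk A p [] hpre.1 hp) (fun p hp => hpre.2 p hp)
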